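-- pv_equiv track=rewrite | github.com/VishnuHC/ai-analyst-agent | nlp_engine.py | _map_synonyms
-- ===== SOURCE A (Python) =====
-- from typing import Dict, List
--
-- SYNONYMS: Dict[str, List[str]] = {
--     "sales": ["revenue", "turnover", "income"],
--     "profit": ["earnings", "net income"],
--     "cost": ["expense", "spend", "expenditure"],
--     "trend": ["pattern", "movement"],
--     "compare": ["difference", "contrast"],
--     "analyze": ["analysis", "evaluate", "study"],
-- }
--
-- def _map_synonyms(tokens: List[str]) -> List[str]:
--     mapped = []
--     for token in tokens:
--         replaced = False
--         for canonical, variants in SYNONYMS.items():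
--             if token == canonical or token in variants:
--                 mapped.append(canonical)
--                 replaced = True
--                 break
--         if not replaced:
--             mapped.append(token)
--     return mapped
-- ===== SOURCE B (Python) =====
-- from typing import Dict, List
--
-- SYNONYMS: Dict[str, List[str]] = {
--     "sales": ["revenue", "turnover", "income"],
--     "profit": ["earnings", "net income"],
--     "cost": ["expense", "spend", "expenditure"],
--     "trend": ["pattern", "movement"],
--     "compare": ["difference", "contrast"],
--     "analyze": ["analysis", "evaluate", "study"],
-- }
--
-- _CANON: Dict[str, str] = {}
-- for _canonical, _variants in SYNONYMS.items():
--     _CANON[_canonical] = _canonical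
--     for _v in _variants:
--         _CANON[_v] = _canonical
--
-- def _map_synonyms(tokens: List[str]) -> List[str]:
--     return [_CANON.get(t, t) for t in tokens]
-- ===== Notes on version B (the rewrite author's own statement) =====
-- stated objective: idiomatic
-- what changed: Replaces the per-token inner scan over SYNONYMS (with membership tests in each variant list) by a flat reverse-lookup dict built once, so the token loop becomes a single dict lookup per token.
import Mathlib
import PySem

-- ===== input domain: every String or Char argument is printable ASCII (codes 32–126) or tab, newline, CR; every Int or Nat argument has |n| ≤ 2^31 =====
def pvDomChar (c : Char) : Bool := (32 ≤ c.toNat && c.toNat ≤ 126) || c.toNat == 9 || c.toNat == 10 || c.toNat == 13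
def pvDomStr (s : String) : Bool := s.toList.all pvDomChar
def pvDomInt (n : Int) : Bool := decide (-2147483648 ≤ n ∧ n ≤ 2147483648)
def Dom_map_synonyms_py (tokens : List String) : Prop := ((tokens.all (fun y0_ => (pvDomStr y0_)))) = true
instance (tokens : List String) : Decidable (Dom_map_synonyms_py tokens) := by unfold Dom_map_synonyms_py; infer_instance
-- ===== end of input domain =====

-- B replaces A's per-token inner scan over SYNONYMS by a flat reverse-lookup dict
-- built once, then a single lookup per token (more idiomatic, one pass over tokens).


-- ===== PORT A =====
-- the module constant SYNONYMS (dict of canonical -> variant list, insertion order)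
def pvSYNONYMS : List (String × List String) :=
  [("sales", ["revenue", "turnover", "income"]),
   ("profit", ["earnings", "net income"]),
   ("cost", ["expense", "spend", "expenditure"]),
   ("trend", ["pattern", "movement"]),
   ("compare", ["difference", "contrast"]),
   ("analyze", ["analysis", "evaluate", "study"])]

-- A's inner 'for canonical, variants in SYNONYMS.items(): … break' loop:
-- returns the first canonical whose entry matches, none if the loop falls through
def pvFindCanon : List (String × List String) → String → Option String
  | [], _ => none
  | (canonical, variants) :: rest, token =>
      if token == canonical || variants.contains token then some canonical
      else pvFindCanon rest token

def map_synonyms_py (tokens : List String) : List String :=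
  tokens.foldl (fun mapped token =>
    match pvFindCanon pvSYNONYMS token with
    | some canonical => mapped ++ [canonical]
    | none => mapped ++ [token]) []

-- ===== PORT B =====
-- the module-level _CANON table: canonical -> itself, every variant -> its canonical
def pvCANON : PySem.Dict String String :=
  pvSYNONYMS.foldl
    (fun d cv => cv.2.foldl (fun d v => d.insert v cv.1) (d.insert cv.1 cv.1))
    PySem.Dict.empty

def map_synonyms_py_alt (tokens : List String) : List String :=
  tokens.map (fun t => pvCANON.getD t t)

-- ===== PRECONDITION & SPEC =====
def Spec_map_synonyms_py (tokens : List String) (out : List String) : Prop := out = map_synonyms_py_alt tokens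
instance (tokens : List String) (out : List String) : Decidable (Spec_map_synonyms_py tokens out) := by unfold Spec_map_synonyms_py; infer_instance

-- ===== CLAIM (what is proved, stated in full; the proofs are below) =====
def Claim_equal_map_synonyms_py : Prop := ∀ (tokens : List String), Dom_map_synonyms_py tokens → Spec_map_synonyms_py tokens (map_synonyms_py tokens)

-- ===== LEMMAS AND PROOFS =====


-- the flat table, computed: pvCANON as a literal association list
theorem pvCANON_eq : pvCANON = PySem.Dict.mk
    [("sales", "sales"), ("revenue", "sales"), ("turnover", "sales"), ("income", "sales"),
     ("profit", "profit"), ("earnings", "profit"), ("net income", "profit"),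
     ("cost", "cost"), ("expense", "cost"), ("spend", "cost"), ("expenditure", "cost"),
     ("trend", "trend"), ("pattern", "trend"), ("movement", "trend"),
     ("compare", "compare"), ("difference", "compare"), ("contrast", "compare"),
     ("analyze", "analyze"), ("analysis", "analyze"), ("evaluate", "analyze"), ("study", "analyze")] := by
  decide

def pvWords : List String :=
  ["sales", "revenue", "turnover", "income", "profit", "earnings", "net income",
   "cost", "expense", "spend", "expenditure", "trend", "pattern", "movement",
   "compare", "difference", "contrast", "analyze", "analysis", "evaluate", "study"]

-- per-token agreement: A's inner scan result equals the flat table's lookup-with-default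
theorem pv_step_eq (t : String) :
    (match pvFindCanon pvSYNONYMS t with
     | some canonical => canonical
     | none => t) = pvCANON.getD t t := by
  rw [pvCANON_eq]
  by_cases h : t ∈ pvWords
  · simp only [pvWords, List.mem_cons, List.not_mem_nil, or_false] at h
    rcases h with h | h | h | h | h | h | h | h | h | h | h | h | h | h | h | h | h | h | h | h | h <;>
      subst h <;> rfl
  · simp only [pvWords, List.mem_cons, List.not_mem_nil, or_false, not_or] at h
    obtain ⟨h1, h2, h3, h4, h5, h6, h7, h8, h9, h10, h11, h12, h13, h14, h15, h16, h17, h18, h19, h20, h21⟩ := h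
    have hs : ∀ a : String, ¬t = a → (a == t) = false :=
      fun a h => beq_eq_false_iff_ne.mpr fun e => h e.symm
    simp [pvFindCanon, pvSYNONYMS, PySem.Dict.getD, PySem.Dict.get?, List.find?,
      hs _ h1, hs _ h2, hs _ h3, hs _ h4, hs _ h5, hs _ h6, hs _ h7, hs _ h8, hs _ h9,
      hs _ h10, hs _ h11, hs _ h12, hs _ h13, hs _ h14, hs _ h15, hs _ h16, hs _ h17,
      hs _ h18, hs _ h19, hs _ h20, hs _ h21,
      h1, h2, h3, h4, h5, h6, h7, h8, h9, h10, h11, h12, h13, h14, h15, h16, h17, h18, h19, h20, h21]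

-- the fold with accumulator: A's foldl builds exactly B's map
theorem pv_fold_eq (tokens : List String) (acc : List String) :
    tokens.foldl (fun mapped token =>
      match pvFindCanon pvSYNONYMS token with
      | some canonical => mapped ++ [canonical]
      | none => mapped ++ [token]) acc
    = acc ++ tokens.map (fun t => pvCANON.getD t t) := by
  induction tokens generalizing acc with
  | nil => simp
  | cons t rest ih =>
    simp only [List.foldl_cons, List.map_cons, ih, ← pv_step_eq t]
    cases pvFindCanon pvSYNONYMS t <;> simp

-- ===== VERDICT (by name: the statement is the Claim_ definition above) =====
theorem map_synonyms_py_spec : Claim_equal_map_synonyms_py := by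
  intro tokens _
  unfold Spec_map_synonyms_py map_synonyms_py map_synonyms_py_alt
  simpa using pv_fold_eq tokens []
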